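-- pv_equiv track=rewrite | github.com/GautamKataria/perplexity-hacks | modules/response_parser.py | parse_sonar_responses
-- ===== SOURCE A (Python) =====
-- from typing import List, Dict
--
-- def parse_sonar_responses(responses: List[Dict]) -> Dict[str, str]:
--     """
--     Organize raw Perplexity responses by pillar name.
--     Input: List of {pillar: str, content: str}
--     Output: Dict mapping each pillar to its content
--     """
--     structured_output = {}
--
--     for item in responses:
--         pillar = item.get("pillar", "unknown")
--         content = item.get("content", "")
--
--         if pillar not in structured_output:
--             structured_output[pillar] = content
--         else:
--             # Append if duplicate pillars appear (e.g., history + current news)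
--             structured_output[pillar] += f"\n\n{content}"
--
--     return structured_output
-- ===== SOURCE B (Python) =====
-- from typing import List, Dict
--
-- def parse_sonar_responses(responses: List[Dict]) -> Dict[str, str]:
--     # Pass 1: group the contents of each pillar into a list, in first-appearance order.
--     grouped = {}
--     for item in responses:
--         grouped.setdefault(item.get("pillar", "unknown"), []).append(item.get("content", ""))
--     # Pass 2: join each pillar's contents with a blank line.
--     return {pillar: "\n\n".join(contents) for pillar, contents in grouped.items()}
-- ===== Notes on version B (the rewrite author's own statement) =====
-- stated objective: simpler
-- what changed: A decides insert-vs-string-append inside the loop; B first groups contents into a pillar -> list dict with setdefault, then a separate pass joins each list with '\n\n'.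
import Mathlib
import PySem

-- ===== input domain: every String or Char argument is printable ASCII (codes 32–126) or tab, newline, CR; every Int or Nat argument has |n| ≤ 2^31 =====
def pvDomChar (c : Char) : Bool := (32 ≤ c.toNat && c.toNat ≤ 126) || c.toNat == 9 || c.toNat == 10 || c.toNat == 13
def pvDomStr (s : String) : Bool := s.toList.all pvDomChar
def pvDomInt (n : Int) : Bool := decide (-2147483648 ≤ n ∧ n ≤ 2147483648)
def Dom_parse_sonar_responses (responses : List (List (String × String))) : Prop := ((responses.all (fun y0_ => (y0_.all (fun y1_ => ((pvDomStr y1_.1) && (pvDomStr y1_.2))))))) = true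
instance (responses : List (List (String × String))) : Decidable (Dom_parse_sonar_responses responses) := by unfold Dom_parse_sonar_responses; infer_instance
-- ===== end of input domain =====

-- B replaces A's in-loop "insert or string-append" branching by two passes — group contents into
-- lists per pillar, then join each list with "\n\n" — a different decomposition (objective: simpler).

-- ===== PORT A =====
def parse_sonar_responses (responses : List (List (String × String))) : List (String × String) :=
  (responses.foldl
    (fun structured_output item =>
      let pillar := (PySem.Dict.mk item).getD "pillar" "unknown"
      let content := (PySem.Dict.mk item).getD "content" ""
      if structured_output.contains pillar = false then
        structured_output.insert pillar content
      else
        structured_output.insert pillar (structured_output.getD pillar "" ++ "\n\n" ++ content))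
    PySem.Dict.empty).items

-- ===== PORT B =====
def parse_sonar_responses_alt (responses : List (List (String × String))) : List (String × String) :=
  let grouped := responses.foldl
    (fun grouped item =>
      grouped.modify ((PySem.Dict.mk item).getD "pillar" "unknown") []
        (fun v => v ++ [(PySem.Dict.mk item).getD "content" ""]))
    PySem.Dict.empty
  grouped.items.map (fun q => (q.1, PySem.Str.join "\n\n" q.2))

-- ===== PRECONDITION & SPEC =====
def Spec_parse_sonar_responses (responses : List (List (String × String))) (out : List (String × String)) : Prop := out = parse_sonar_responses_alt responses
instance (responses : List (List (String × String))) (out : List (String × String)) : Decidable (Spec_parse_sonar_responses responses out) := by unfold Spec_parse_sonar_responses; infer_instance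

-- ===== CLAIM (what is proved, stated in full; the proofs are below) =====
def Claim_equal_parse_sonar_responses : Prop := ∀ (responses : List (List (String × String))), Dom_parse_sonar_responses responses → Spec_parse_sonar_responses responses (parse_sonar_responses responses)

-- ===== LEMMAS AND PROOFS =====

-- "\n\n".join(v) as used by B's second pass
def pvJoin (v : List String) : String := PySem.Str.join "\n\n" v

theorem pv_ic_cons_cons (sep x y : List Char) (ys : List (List Char)) :
    sep.intercalate (x :: y :: ys) = x ++ sep ++ sep.intercalate (y :: ys) := by
  simp [List.intercalate, List.intersperse]

theorem pv_ic_append_singleton (sep : List Char) (v : List (List Char)) (c : List Char) (h : v ≠ []) :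
    sep.intercalate (v ++ [c]) = sep.intercalate v ++ sep ++ c := by
  induction v with
  | nil => simp at h
  | cons x xs ih =>
    cases xs with
    | nil => simp [List.intercalate, List.intersperse]
    | cons y ys =>
      calc sep.intercalate ((x :: y :: ys) ++ [c])
          = x ++ sep ++ sep.intercalate (y :: (ys ++ [c])) := pv_ic_cons_cons ..
        _ = x ++ sep ++ (sep.intercalate (y :: ys) ++ sep ++ c) := by
            rw [show (y :: (ys ++ [c]) : List (List Char)) = (y :: ys) ++ [c] from rfl, ih (by simp)]
        _ = sep.intercalate (x :: y :: ys) ++ sep ++ c := by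
            rw [pv_ic_cons_cons]; simp [List.append_assoc]

theorem pvJoin_singleton (c : String) : pvJoin [c] = c := by
  simp [pvJoin, PySem.Str.join, PySem.Chars.join, List.intercalate]

theorem pvJoin_append (v : List String) (c : String) (h : v ≠ []) :
    pvJoin (v ++ [c]) = pvJoin v ++ "\n\n" ++ c := by
  have hm : v.map String.toList ≠ [] := by simpa using h
  apply String.toList_injective
  simp only [pvJoin, PySem.Str.join, PySem.Chars.join, List.map_append, List.map_cons,
    List.map_nil, String.toList_append, String.toList_ofList]
  rw [pv_ic_append_singleton _ _ _ hm]

-- the invariant tying A's string dict to B's list dict through the whole fold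
theorem pv_fold_rel (l : List (List (String × String)))
    (dA : PySem.Dict String String) (dB : PySem.Dict String (List String))
    (hnd : dB.keys.Nodup)
    (hne : ∀ q ∈ dB.items, q.2 ≠ [])
    (hit : dA.items = dB.items.map (fun q => (q.1, pvJoin q.2))) :
    (l.foldl
      (fun structured_output item =>
        let pillar := (PySem.Dict.mk item).getD "pillar" "unknown"
        let content := (PySem.Dict.mk item).getD "content" ""
        if structured_output.contains pillar = false then
          structured_output.insert pillar content
        else
          structured_output.insert pillar (structured_output.getD pillar "" ++ "\n\n" ++ content))
      dA).items
    = ((l.foldl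
        (fun grouped item =>
          grouped.modify ((PySem.Dict.mk item).getD "pillar" "unknown") []
            (fun v => v ++ [(PySem.Dict.mk item).getD "content" ""]))
        dB).items).map (fun q => (q.1, pvJoin q.2)) := by
  induction l generalizing dA dB with
  | nil => simpa using hit
  | cons a l ih =>
    simp only [List.foldl_cons]
    set p := (PySem.Dict.mk a).getD "pillar" "unknown" with hp
    set c := (PySem.Dict.mk a).getD "content" "" with hc
    have hkeys : dA.keys = dB.keys := by
      simp only [PySem.Dict.keys, hit, List.map_map]; rfl
    have hcont : dA.contains p = dB.contains p := by
      rw [PySem.Dict.contains_eq_decide_mem_keys, PySem.Dict.contains_eq_decide_mem_keys, hkeys]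
    have hmodB : dB.modify p [] (fun v => v ++ [c]) = dB.insert p (dB.getD p [] ++ [c]) := rfl
    by_cases hB : dB.contains p = true
    · -- duplicate pillar: both sides overwrite the existing entry in place
      obtain ⟨v, hv⟩ : ∃ v, dB.get? p = some v := by
        rw [PySem.Dict.contains_eq_isSome_get?] at hB
        exact Option.isSome_iff_exists.mp hB
      have hvmem : (p, v) ∈ dB.items := PySem.Dict.mem_items_of_get?_eq_some dB hv
      have hvne : v ≠ [] := hne _ hvmem
      have hgetDB : dB.getD p [] = v := PySem.Dict.getD_of_get?_eq_some dB [] hv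
      have hndA : dA.keys.Nodup := hkeys ▸ hnd
      have hAmem : (p, pvJoin v) ∈ dA.items := by
        rw [hit]; exact List.mem_map_of_mem hvmem
      have hAval : dA.getD p "" = pvJoin v := PySem.Dict.getD_of_mem_items dA hAmem hndA ""
      have hcontA : dA.contains p = true := hcont.trans hB
      apply ih
      · rwa [hmodB, PySem.Dict.keys_insert_of_contains _ _ hB]
      · intro q hq
        rw [hmodB] at hq
        rcases (PySem.Dict.mem_items_insert ..).mp hq with hq1 | hq2
        · subst hq1; simp
        · exact hne _ hq2.1
      · simp only [hcontA, Bool.true_eq_false, if_false, hmodB]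
        rw [PySem.Dict.items_insert_of_contains _ _ hcontA,
            PySem.Dict.items_insert_of_contains _ _ hB, hit, List.map_map, List.map_map]
        refine List.map_congr_left (fun q hq => ?_)
        simp only [Function.comp_apply]
        by_cases hqp : q.1 = p
        · simp only [hqp, beq_self_eq_true, if_true]
          rw [hgetDB, pvJoin_append _ _ hvne, hAval]
        · simp [hqp]
    · -- fresh pillar: both sides append a new entry
      have hBf : dB.contains p = false := by simpa using hB
      have hcontA : dA.contains p = false := hcont.trans hBf
      have hgetDB : dB.getD p [] = [] := PySem.Dict.getD_of_not_contains dB [] hBf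
      have hpnot : p ∉ dB.keys := by
        intro hmem
        rw [PySem.Dict.contains_eq_decide_mem_keys] at hBf
        simp [hmem] at hBf
      apply ih
      · rw [hmodB, PySem.Dict.keys_insert_of_not_contains _ _ hBf]
        simp [List.nodup_append, hnd]
        exact fun a ha hap => hpnot (hap ▸ ha)
      · intro q hq
        rw [hmodB] at hq
        rcases (PySem.Dict.mem_items_insert ..).mp hq with hq1 | hq2
        · subst hq1; simp
        · exact hne _ hq2.1
      · simp only [hcontA, if_true, hmodB, hgetDB, List.nil_append]
        rw [PySem.Dict.items_insert_of_not_contains _ _ hcontA,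
            PySem.Dict.items_insert_of_not_contains _ _ hBf, hit]
        simp [pvJoin_singleton]

-- ===== VERDICT (by name: the statement is the Claim_ definition above) =====
theorem parse_sonar_responses_spec : Claim_equal_parse_sonar_responses := by
  intro responses _
  unfold Spec_parse_sonar_responses parse_sonar_responses parse_sonar_responses_alt
  exact pv_fold_rel responses PySem.Dict.empty PySem.Dict.empty (by simp [PySem.Dict.keys_empty])
    (by intro q hq; simp [PySem.Dict.empty] at hq) (by simp [PySem.Dict.empty])
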